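-- pv_equiv track=rewrite | github.com/hambonesoftware/MIND | backend/tests/test_progression_runtime.py | _pitch_classes_to_midi
-- ===== SOURCE A (Python) =====
-- def _pitch_classes_to_midi(pitch_classes: list[int], register_min: int, register_max: int) -> list[int]:
--     voiced = []
--     base = register_min
--     for pc in pitch_classes:
--         midi = base + ((pc - base) % 12)
--         while midi < register_min:
--             midi += 12
--         while midi > register_max:
--             midi -= 12
--         voiced.append(midi)
--     return voiced
-- ===== SOURCE B (Python) =====
-- def _pitch_classes_to_midi(pitch_classes: list[int], register_min: int, register_max: int) -> list[int]:
--     def place(pc: int) -> int: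
--         midi = register_min + (pc - register_min) % 12
--         if midi > register_max:
--             midi = register_max - (register_max - pc) % 12
--         return midi
--     return [place(pc) for pc in pitch_classes]
-- ===== Notes on version B (the rewrite author's own statement) =====
-- stated objective: simpler
-- what changed: Replaces both while-loops (iterative +=12/-=12 adjustment) with a closed-form modular clamp computed once per pitch class, and builds the result as a comprehension instead of append-accumulation.
import Mathlib
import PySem

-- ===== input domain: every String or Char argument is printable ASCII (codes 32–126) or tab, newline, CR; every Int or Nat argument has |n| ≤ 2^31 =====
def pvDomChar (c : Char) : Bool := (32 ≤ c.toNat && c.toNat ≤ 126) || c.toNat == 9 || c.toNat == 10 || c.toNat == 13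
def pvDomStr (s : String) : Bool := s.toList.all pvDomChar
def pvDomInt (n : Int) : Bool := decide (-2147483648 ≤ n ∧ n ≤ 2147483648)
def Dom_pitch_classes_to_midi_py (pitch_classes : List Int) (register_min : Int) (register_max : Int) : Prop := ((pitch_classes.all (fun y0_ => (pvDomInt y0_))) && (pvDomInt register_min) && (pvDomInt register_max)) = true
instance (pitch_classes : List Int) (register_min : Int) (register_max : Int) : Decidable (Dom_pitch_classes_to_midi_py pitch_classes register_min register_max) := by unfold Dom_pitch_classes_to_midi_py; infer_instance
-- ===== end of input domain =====

-- B replaces A's two bounded while-loops with a closed-form modular clamp (simpler, one pass, no inner iteration).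


-- ===== PORT A =====
-- 'while midi < register_min: midi += 12'
def pvWhileUp (register_min midi : Int) : Int :=
  if midi < register_min then pvWhileUp register_min (midi + 12) else midi
termination_by (register_min - midi).toNat
decreasing_by omega

-- 'while midi > register_max: midi -= 12'
def pvWhileDown (register_max midi : Int) : Int :=
  if midi > register_max then pvWhileDown register_max (midi - 12) else midi
termination_by (midi - register_max).toNat
decreasing_by omega

def pitch_classes_to_midi_py (pitch_classes : List Int) (register_min : Int) (register_max : Int) : List Int :=
  -- voiced = []; base = register_min; for pc in pitch_classes: … ; voiced.append(midi)
  pitch_classes.foldl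
    (fun voiced pc =>
      let midi := register_min + PySem.Int.mod (pc - register_min) 12
      let midi := pvWhileUp register_min midi
      let midi := pvWhileDown register_max midi
      voiced ++ [midi]) []

-- ===== PORT B =====
def pvPlace (register_min register_max pc : Int) : Int :=
  let midi := register_min + PySem.Int.mod (pc - register_min) 12
  if midi > register_max then register_max - PySem.Int.mod (register_max - pc) 12 else midi

def pitch_classes_to_midi_py_alt (pitch_classes : List Int) (register_min : Int) (register_max : Int) : List Int :=
  pitch_classes.map (pvPlace register_min register_max)

-- ===== PRECONDITION & SPEC =====
def Spec_pitch_classes_to_midi_py (pitch_classes : List Int) (register_min : Int) (register_max : Int) (out : List Int) : Prop := out = pitch_classes_to_midi_py_alt pitch_classes register_min register_max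
instance (pitch_classes : List Int) (register_min : Int) (register_max : Int) (out : List Int) : Decidable (Spec_pitch_classes_to_midi_py pitch_classes register_min register_max out) := by unfold Spec_pitch_classes_to_midi_py; infer_instance

-- ===== CLAIM (what is proved, stated in full; the proofs are below) =====
def Claim_equal_pitch_classes_to_midi_py : Prop := ∀ (pitch_classes : List Int) (register_min : Int) (register_max : Int), Dom_pitch_classes_to_midi_py pitch_classes register_min register_max → Spec_pitch_classes_to_midi_py pitch_classes register_min register_max (pitch_classes_to_midi_py pitch_classes register_min register_max)

-- ===== LEMMAS AND PROOFS =====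
theorem pvWhileUp_noop (rmin m : Int) (h : rmin ≤ m) : pvWhileUp rmin m = m := by
  unfold pvWhileUp; simp [not_lt.mpr h]

theorem pvWhileDown_closed (rmax m : Int) :
    pvWhileDown rmax m = if m > rmax then rmax - (rmax - m) % 12 else m := by
  by_cases h : m > rmax
  · rw [pvWhileDown]
    simp only [if_pos h]
    rw [pvWhileDown_closed rmax (m - 12)]
    split_ifs with h2 <;> omega
  · rw [pvWhileDown]; simp [h]
termination_by (m - rmax).toNat
decreasing_by omega

theorem pv_point (rmin rmax pc : Int) :
    pvWhileDown rmax (pvWhileUp rmin (rmin + PySem.Int.mod (pc - rmin) 12)) =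
    pvPlace rmin rmax pc := by
  rw [PySem.Int.mod_eq_emod_of_pos (by norm_num : (0:Int) < 12)]
  rw [pvWhileUp_noop rmin _ (by have := Int.emod_nonneg (pc - rmin) (by norm_num : (12:Int) ≠ 0); omega)]
  rw [pvWhileDown_closed]
  simp only [pvPlace]
  rw [PySem.Int.mod_eq_emod_of_pos (by norm_num : (0:Int) < 12),
      PySem.Int.mod_eq_emod_of_pos (by norm_num : (0:Int) < 12)]
  split_ifs <;> omega

theorem pv_fold (rmin rmax : Int) (l : List Int) (acc : List Int) :
    l.foldl (fun voiced pc =>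
      let midi := rmin + PySem.Int.mod (pc - rmin) 12
      let midi := pvWhileUp rmin midi
      let midi := pvWhileDown rmax midi
      voiced ++ [midi]) acc = acc ++ l.map (pvPlace rmin rmax) := by
  induction l generalizing acc with
  | nil => simp
  | cons pc t ih =>
    simp only [List.foldl, List.map]
    rw [pv_point, ih]
    simp

-- ===== VERDICT (by name: the statement is the Claim_ definition above) =====
theorem pitch_classes_to_midi_py_spec : Claim_equal_pitch_classes_to_midi_py := by
  intro pcs rmin rmax _
  unfold Spec_pitch_classes_to_midi_py pitch_classes_to_midi_py pitch_classes_to_midi_py_alt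
  simpa using pv_fold rmin rmax pcs []
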